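-- pv_equiv track=rewrite | github.com/FYLIN0522/Algorithms | Assignment 2-DP.py | extra
-- ===== SOURCE A (Python) =====
-- def extra(s, lcs):
--     """LCS"""
--     res = []
--     lcsnew = lcs[:]
--
--     for i in range(len(s)):
--         if len(lcsnew) > 0 and s[i] == lcsnew[0]:
--             lcsnew.pop(0)
--             res.append(s[i])
--
--         else:
--             res += ["[[", s[i], "]]"]
--
--
--     res = "".join(res)
--     return res
-- ===== SOURCE B (Python) =====
-- def extra(s, lcs):
--     """LCS"""
--     # Pass 1: greedily match s against lcs, recording matched positions.
--     matched = set()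
--     j = 0
--     for i in range(len(s)):
--         if j < len(lcs) and s[i] == lcs[j]:
--             matched.add(i)
--             j += 1
--     # Pass 2: render.
--     res = []
--     for i in range(len(s)):
--         if i in matched:
--             res.append(s[i])
--         else:
--             res += ["[[", s[i], "]]"]
--     return "".join(res)
-- ===== Notes on version B (the rewrite author's own statement) =====
-- stated objective: alternative
-- what changed: Splits A's single interleaved match-and-render loop into two passes: a first pass greedily matches s against lcs with a pointer j and records the matched positions in a set, and a second, separate pass renders the output from that index table (no pop(0) on an lcs copy).
import Mathlib
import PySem

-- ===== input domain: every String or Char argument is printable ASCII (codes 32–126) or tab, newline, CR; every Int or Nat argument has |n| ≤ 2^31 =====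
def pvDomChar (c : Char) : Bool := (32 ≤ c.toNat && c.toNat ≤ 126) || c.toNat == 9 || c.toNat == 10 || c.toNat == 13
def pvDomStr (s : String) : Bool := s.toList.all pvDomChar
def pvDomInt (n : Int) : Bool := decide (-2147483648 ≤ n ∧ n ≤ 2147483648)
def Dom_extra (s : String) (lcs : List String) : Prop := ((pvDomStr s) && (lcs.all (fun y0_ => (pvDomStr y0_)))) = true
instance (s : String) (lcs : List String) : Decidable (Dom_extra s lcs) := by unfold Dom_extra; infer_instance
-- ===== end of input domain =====

-- B replaces A's interleaved match-and-render loop by a pointer-based match pass producing an index table plus a separate render pass (alternative decomposition; same return value).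

-- ===== PORT A =====
-- A's loop: state (lcsnew, res); per char either pop lcsnew & append the char, or append "[[", char, "]]".
def extraLoop (cs : List Char) (lcsnew : List String) (res : List String) : List String :=
  match cs with
  | [] => res
  | c :: rest =>
    match lcsnew with
    | l :: ls =>
      if String.mk [c] = l then extraLoop rest ls (res ++ [String.mk [c]])
      else extraLoop rest (l :: ls) (res ++ ["[[", String.mk [c], "]]"])
    | [] => extraLoop rest [] (res ++ ["[[", String.mk [c], "]]"])

def extra (s : String) (lcs : List String) : String :=
  PySem.Str.join "" (extraLoop s.toList lcs [])

-- ===== PORT B =====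
-- Pass 1: pointer j into lcs; record matched positions i.
def altMatch (cs : List Char) (lcs : List String) (j : Nat) (i : Nat) : List Nat :=
  match cs with
  | [] => []
  | c :: rest =>
    if j < lcs.length ∧ lcs.getD j "" = String.mk [c] then
      i :: altMatch rest lcs (j + 1) (i + 1)
    else
      altMatch rest lcs j (i + 1)

-- Pass 2: render from the index table.
def altRender (cs : List Char) (i : Nat) (m : List Nat) : List String :=
  match cs with
  | [] => []
  | c :: rest =>
    (if i ∈ m then [String.mk [c]] else ["[[", String.mk [c], "]]"]) ++ altRender rest (i + 1) m

def extra_alt (s : String) (lcs : List String) : String :=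
  PySem.Str.join "" (altRender s.toList 0 (altMatch s.toList lcs 0 0))

-- ===== PRECONDITION & SPEC =====
def Spec_extra (s : String) (lcs : List String) (out : String) : Prop := out = extra_alt s lcs
instance (s : String) (lcs : List String) (out : String) : Decidable (Spec_extra s lcs out) := by unfold Spec_extra; infer_instance

-- ===== CLAIM (what is proved, stated in full; the proofs are below) =====
def Claim_equal_extra : Prop := ∀ (s : String) (lcs : List String), Dom_extra s lcs → Spec_extra s lcs (extra s lcs)

-- ===== LEMMAS AND PROOFS =====

-- accumulator-free form of A's loop (proof helper)
def pieces (cs : List Char) (lcsnew : List String) : List String :=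
  match cs with
  | [] => []
  | c :: rest =>
    match lcsnew with
    | l :: ls =>
      if String.mk [c] = l then String.mk [c] :: pieces rest ls
      else "[[" :: String.mk [c] :: "]]" :: pieces rest (l :: ls)
    | [] => "[[" :: String.mk [c] :: "]]" :: pieces rest []

theorem extraLoop_eq_pieces (cs : List Char) (ls res : List String) :
    extraLoop cs ls res = res ++ pieces cs ls := by
  induction cs generalizing ls res with
  | nil => simp [extraLoop, pieces]
  | cons c rest ih =>
    cases ls with
    | nil => simp only [extraLoop, pieces]; rw [ih]; simp
    | cons l ls' =>
      by_cases h : String.mk [c] = l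
      · simp only [extraLoop, pieces, if_pos h]; rw [ih]; simp
      · simp only [extraLoop, pieces, if_neg h]; rw [ih]; simp

theorem altMatch_ge {cs : List Char} {lcs : List String} {j i k : Nat}
    (h : k ∈ altMatch cs lcs j i) : i ≤ k := by
  induction cs generalizing j i with
  | nil => simp [altMatch] at h
  | cons c rest ih =>
    unfold altMatch at h
    split at h
    · rcases List.mem_cons.mp h with h | h
      · omega
      · have := ih h; omega
    · have := ih h; omega

theorem altRender_drop {cs : List Char} {i k : Nat} (m : List Nat) (hk : k < i) :
    altRender cs i (k :: m) = altRender cs i m := by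
  induction cs generalizing i with
  | nil => rfl
  | cons c rest ih =>
    unfold altRender
    rw [ih (by omega)]
    simp only [List.mem_cons]
    have hne : ¬ i = k := by omega
    simp [hne]

-- main invariant: A's loop on the remaining lcs equals render from B's match table
theorem pieces_eq_render (cs : List Char) (lcs : List String) (j i : Nat)
    (hj : j ≤ lcs.length) :
    pieces cs (lcs.drop j) = altRender cs i (altMatch cs lcs j i) := by
  induction cs generalizing j i with
  | nil => rfl
  | cons c rest ih =>
    unfold pieces altMatch altRender
    by_cases hlt : j < lcs.length
    · have hdrop : lcs.drop j = lcs[j] :: lcs.drop (j + 1) :=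
        List.drop_eq_getElem_cons hlt
      rw [hdrop]
      by_cases heq : String.mk [c] = lcs[j]
      · have hcond : j < lcs.length ∧ lcs.getD j "" = String.mk [c] := by
          refine ⟨hlt, ?_⟩
          rw [List.getD_eq_getElem _ _ hlt, heq]
        simp only [if_pos heq, if_pos hcond]
        rw [ih (j + 1) (i + 1) (by omega)]
        have hmem : i ∈ i :: altMatch rest lcs (j + 1) (i + 1) := List.mem_cons_self ..
        rw [altRender_drop _ (by omega)]
        simp [hmem]
      · have hcond : ¬ (j < lcs.length ∧ lcs.getD j "" = String.mk [c]) := by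
          rintro ⟨_, h2⟩
          rw [List.getD_eq_getElem _ _ hlt] at h2
          exact heq h2.symm
        simp only [if_neg heq, if_neg hcond]
        have ih' := ih j (i + 1) (by omega)
        rw [hdrop] at ih'
        rw [ih']
        have hni : i ∉ altMatch rest lcs j (i + 1) := fun h => by
          have := altMatch_ge h; omega
        simp [hni]
    · have hdrop : lcs.drop j = [] := List.drop_eq_nil_of_le (by omega)
      rw [hdrop]
      have hcond : ¬ (j < lcs.length ∧ lcs.getD j "" = String.mk [c]) := fun h => hlt h.1
      simp only [if_neg hcond]
      have ih' := ih j (i + 1) hj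
      rw [hdrop] at ih'
      rw [ih']
      have hni : i ∉ altMatch rest lcs j (i + 1) := fun h => by
        have := altMatch_ge h; omega
      simp [hni]

-- ===== VERDICT (by name: the statement is the Claim_ definition above) =====
theorem extra_spec : Claim_equal_extra := by
  intro s lcs _
  unfold Spec_extra extra extra_alt
  rw [extraLoop_eq_pieces, List.nil_append]
  have h := pieces_eq_render s.toList lcs 0 0 (by omega)
  rw [List.drop_zero] at h
  rw [h]
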